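-- pv_equiv track=rewrite | github.com/vinayakrajvardhan/Python-logic-building-durgasoft | Folder 3/110 encrypt-message(note).py | decrypt_code
-- ===== SOURCE A (Python) =====
-- def decrypt_code(encrypted_code):
--     """
--     Decrypt the encrypted code by interchanging each consecutive digit.
--
--     Args:
--         encrypted_code (str): The encrypted code.
--
--     Returns:
--         str: The decrypted code.
--     """
--     decrypted_code = ""
--     i = 0
--     while i < len(encrypted_code):
--         if i + 1 < len(encrypted_code):
--             decrypted_code += encrypted_code[i + 1] + encrypted_code[i]
--             i += 2
--         else:
--             decrypted_code += encrypted_code[i]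
--             i += 1
--     return decrypted_code
-- ===== SOURCE B (Python) =====
-- def decrypt_code(encrypted_code):
--     """Index-permutation view: output position i reads from its pair partner."""
--     n = len(encrypted_code)
--
--     def src(i):
--         p = i + 1 if i % 2 == 0 else i - 1   # pair partner of position i
--         return p if p < n else i             # lone trailing char maps to itself
--     return "".join(encrypted_code[src(i)] for i in range(n))
-- ===== Notes on version B (the rewrite author's own statement) =====
-- stated objective: faster
-- what changed: Replaces A's stateful while loop that accumulates swapped pairs by repeated string concatenation with an index-permutation map: for each output position i it computes the source position (the pair partner i+-1, or i itself for a lone trailing char) and joins the characters read there, so no pairing, step-size branching, or pair accumulation occurs.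
import Mathlib
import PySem

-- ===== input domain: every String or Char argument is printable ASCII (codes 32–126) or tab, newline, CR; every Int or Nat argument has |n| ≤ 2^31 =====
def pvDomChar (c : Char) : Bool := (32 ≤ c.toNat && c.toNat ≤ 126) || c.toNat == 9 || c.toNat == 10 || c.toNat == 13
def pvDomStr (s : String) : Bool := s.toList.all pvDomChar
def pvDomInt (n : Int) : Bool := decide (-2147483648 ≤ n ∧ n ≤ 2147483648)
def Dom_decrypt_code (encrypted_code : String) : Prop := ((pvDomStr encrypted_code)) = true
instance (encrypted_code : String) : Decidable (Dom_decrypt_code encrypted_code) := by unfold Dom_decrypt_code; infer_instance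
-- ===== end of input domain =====

-- B replaces A's stateful while loop (accumulating swapped pairs with an odd-tail branch)
-- by an index-permutation map: output position i reads the character at its pair partner
-- (i±1, or i itself for a lone trailing char); equal on all inputs.


-- ===== PORT A =====
-- A's while loop: index i, accumulator string; in-range indexing is getElem (exact here:
-- both indices are nonnegative and guarded by the i+1 < len / i < len tests).
def decryptLoopA (cs : List Char) (i : Nat) (acc : List Char) : List Char :=
  if h : i < cs.length then
    if h1 : i + 1 < cs.length then
      decryptLoopA cs (i + 2) (acc ++ [cs[i + 1], cs[i]])
    else
      decryptLoopA cs (i + 1) (acc ++ [cs[i]])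
  else acc
termination_by cs.length - i

def decrypt_code (encrypted_code : String) : String :=
  String.mk (decryptLoopA encrypted_code.toList 0 [])

-- ===== PORT B =====
-- Source B's src(i): the pair partner i+1 / i-1, kept at i when the partner is past the end.
def srcIdx (n i : Nat) : Nat :=
  let p := if i % 2 = 0 then i + 1 else i - 1
  if p < n then p else i

-- "".join(s[src(i)] for i in range(n)); range(n) over the naturals 0..n-1 is List.range n,
-- and s[src(i)] is in-range indexing (src(i) < n whenever i < n), rendered with getD —
-- exact here since the index is always in range.
def decrypt_code_alt (encrypted_code : String) : String :=
  let cs := encrypted_code.toList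
  let n := cs.length
  String.mk ((List.range n).map (fun i => cs.getD (srcIdx n i) default))

-- ===== PRECONDITION & SPEC =====
def Spec_decrypt_code (encrypted_code : String) (out : String) : Prop := out = decrypt_code_alt encrypted_code
instance (encrypted_code : String) (out : String) : Decidable (Spec_decrypt_code encrypted_code out) := by unfold Spec_decrypt_code; infer_instance

-- ===== CLAIM (what is proved, stated in full; the proofs are below) =====
def Claim_equal_decrypt_code : Prop := ∀ (encrypted_code : String), Dom_decrypt_code encrypted_code → Spec_decrypt_code encrypted_code (decrypt_code encrypted_code)

-- ===== LEMMAS AND PROOFS =====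

/-- Common characterisation: swap consecutive pairs, lone trailing char kept. -/
def pairSwap : List Char → List Char
  | a :: b :: t => b :: a :: pairSwap t
  | l => l

theorem loopA_eq (cs : List Char) (i : Nat) (acc : List Char) :
    decryptLoopA cs i acc = acc ++ pairSwap (cs.drop i) := by
  by_cases h : i < cs.length
  · by_cases h1 : i + 1 < cs.length
    · have hd : cs.drop i = cs[i] :: cs[i+1] :: cs.drop (i + 2) := by
        have e1 : cs.drop i = cs[i] :: cs.drop (i + 1) := List.drop_eq_getElem_cons h
        have e2 : cs.drop (i + 1) = cs[i+1] :: cs.drop (i + 2) := List.drop_eq_getElem_cons h1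
        rw [e1, e2]
      rw [decryptLoopA, dif_pos h, dif_pos h1, loopA_eq, hd, pairSwap]
      simp
    · have hd : cs.drop i = [cs[i]] := by
        have e1 : cs.drop i = cs[i] :: cs.drop (i + 1) := List.drop_eq_getElem_cons h
        rw [e1, List.drop_eq_nil_of_le (by omega)]
      rw [decryptLoopA, dif_pos h, dif_neg h1, loopA_eq, hd]
      have : cs.drop (i + 1) = [] := List.drop_eq_nil_of_le (by omega)
      simp [this, pairSwap]
  · rw [decryptLoopA, dif_neg h]
    rw [List.drop_eq_nil_of_le (by omega)]
    simp [pairSwap]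
termination_by cs.length - i

theorem length_pairSwap (l : List Char) : (pairSwap l).length = l.length := by
  match l with
  | [] => rfl
  | [a] => rfl
  | a :: b :: t => simp [pairSwap, length_pairSwap t]

theorem srcIdx_lt (n i : Nat) (h : i < n) : srcIdx n i < n := by
  unfold srcIdx; dsimp only; split_ifs <;> omega

theorem srcIdx_step (n i : Nat) (hn : 2 ≤ n) :
    srcIdx n (i + 2) = srcIdx (n - 2) i + 2 := by
  unfold srcIdx
  have : (i + 2) % 2 = i % 2 := by omega
  dsimp only; rw [this]
  split_ifs <;> omega

theorem getElem_pairSwap (l : List Char) (i : Nat) (h : i < l.length) :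
    (pairSwap l)[i]'(by rw [length_pairSwap]; exact h) =
      l[srcIdx l.length i]'(srcIdx_lt _ _ h) := by
  match l, i with
  | [a], 0 => rfl
  | a :: b :: t, 0 => rfl
  | a :: b :: t, 1 => rfl
  | a :: b :: t, i + 2 =>
    have h' : i < t.length := by simpa using h
    have hstep : srcIdx (a :: b :: t).length (i + 2) = srcIdx t.length i + 2 := by
      have := srcIdx_step (a :: b :: t).length i (by simp)
      simpa using this
    have ih := getElem_pairSwap t i h'
    simp only [pairSwap, hstep]
    simpa using ih

theorem altList_eq (cs : List Char) :
    (List.range cs.length).map (fun i => cs.getD (srcIdx cs.length i) default)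
      = pairSwap cs := by
  apply List.ext_getElem
  · simp [length_pairSwap]
  · intro i h1 h2
    have hi : i < cs.length := by simpa using h1
    rw [List.getElem_map, List.getElem_range]
    rw [List.getD_eq_getElem cs default (srcIdx_lt _ _ hi)]
    exact (getElem_pairSwap cs i hi).symm

-- ===== VERDICT (by name: the statement is the Claim_ definition above) =====
theorem decrypt_code_spec : Claim_equal_decrypt_code := by
  intro s _
  show decrypt_code s = decrypt_code_alt s
  unfold decrypt_code decrypt_code_alt
  rw [loopA_eq]
  simp only [List.drop_zero, List.nil_append, altList_eq]
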